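-- pv_equiv track=rewrite | github.com/hidecha/employment-certificate | Agent/main.py | _find_deficit_sections
-- ===== SOURCE A (Python) =====
-- def _find_deficit_sections(
--     fields: dict, expected_sections: list[tuple[str, int]]
-- ) -> list[tuple[str, int, int]]:
--     """不足セクションを検出する。(prefix, expected, actual) のリストを返す。"""
--     deficits = []
--     for prefix, expected in expected_sections:
--         actual = len([k for k in fields if k.startswith(prefix)])
--         if actual < expected:
--             deficits.append((prefix, expected, actual))
--     return deficits
-- ===== SOURCE B (Python) =====
-- def _find_deficit_sections(
--     fields: dict, expected_sections: list[tuple[str, int]]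
-- ) -> list[tuple[str, int, int]]:
--     """不足セクションを検出する。(prefix, expected, actual) のリストを返す。"""
--     counts = {}
--     for prefix, _expected in expected_sections:
--         counts[prefix] = 0
--     for k in fields:
--         for prefix in counts:
--             if k.startswith(prefix):
--                 counts[prefix] += 1
--     return [(prefix, expected, counts[prefix])
--             for prefix, expected in expected_sections
--             if counts[prefix] < expected]
-- ===== Notes on version B (the rewrite author's own statement) =====
-- stated objective: alternative
-- what changed: Instead of re-scanning all field keys once per expected section, B first builds a prefix->count table in a single sweep over the field keys (incrementing every matching distinct prefix), then a separate reporting pass over expected_sections emits the deficits by table lookup.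
import Mathlib
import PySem

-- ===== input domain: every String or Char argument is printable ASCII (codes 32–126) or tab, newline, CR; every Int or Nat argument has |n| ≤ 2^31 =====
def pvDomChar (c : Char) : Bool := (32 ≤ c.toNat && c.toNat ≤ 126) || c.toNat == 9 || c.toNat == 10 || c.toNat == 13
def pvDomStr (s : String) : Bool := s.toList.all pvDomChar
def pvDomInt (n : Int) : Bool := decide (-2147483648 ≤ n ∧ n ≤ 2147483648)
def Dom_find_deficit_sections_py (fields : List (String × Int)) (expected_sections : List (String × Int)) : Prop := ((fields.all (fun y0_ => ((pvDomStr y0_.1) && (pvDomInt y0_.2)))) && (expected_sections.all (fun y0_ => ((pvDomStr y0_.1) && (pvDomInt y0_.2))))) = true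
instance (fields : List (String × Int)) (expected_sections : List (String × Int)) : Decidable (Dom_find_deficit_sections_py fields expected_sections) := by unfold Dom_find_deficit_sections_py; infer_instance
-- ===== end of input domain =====

-- B replaces A's per-section rescans of the field keys by one count-table sweep plus a reporting pass (alternative decomposition, same asymptotic cost).

-- ===== PORT A =====
def find_deficit_sections_py (fields : List (String × Int)) (expected_sections : List (String × Int)) : List (String × Int × Int) :=
  expected_sections.foldl (fun deficits pe =>
    let actual : Int := (fields.filter (fun kv => PySem.Str.startswith kv.1 pe.1)).length
    if actual < pe.2 then deficits ++ [(pe.1, pe.2, actual)] else deficits) []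

-- ===== PORT B =====
def find_deficit_sections_py_alt (fields : List (String × Int)) (expected_sections : List (String × Int)) : List (String × Int × Int) :=
  let counts0 : PySem.Dict String Int :=
    expected_sections.foldl (fun d pe => d.insert pe.1 0) PySem.Dict.empty
  let counts : PySem.Dict String Int :=
    fields.foldl (fun d kv =>
      d.keys.foldl (fun d' p =>
        if PySem.Str.startswith kv.1 p then d'.modify p 0 (· + 1) else d') d) counts0
  expected_sections.filterMap (fun pe =>
    if counts.getD pe.1 0 < pe.2 then some (pe.1, pe.2, counts.getD pe.1 0) else none)

-- ===== PRECONDITION & SPEC =====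
def Spec_find_deficit_sections_py (fields : List (String × Int)) (expected_sections : List (String × Int)) (out : List (String × Int × Int)) : Prop := out = find_deficit_sections_py_alt fields expected_sections
instance (fields : List (String × Int)) (expected_sections : List (String × Int)) (out : List (String × Int × Int)) : Decidable (Spec_find_deficit_sections_py fields expected_sections out) := by unfold Spec_find_deficit_sections_py; infer_instance

-- ===== CLAIM (what is proved, stated in full; the proofs are below) =====
def Claim_equal_find_deficit_sections_py : Prop := ∀ (fields : List (String × Int)) (expected_sections : List (String × Int)), Dom_find_deficit_sections_py fields expected_sections → Spec_find_deficit_sections_py fields expected_sections (find_deficit_sections_py fields expected_sections)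

-- ===== LEMMAS AND PROOFS =====

-- keys of the inner (per-field-key) loop are unchanged: every key modified is already present
theorem inner_keys (cond : String → Bool) :
    ∀ (ks : List String) (d : PySem.Dict String Int), (∀ p ∈ ks, p ∈ d.keys) →
    (ks.foldl (fun d' p => if cond p then d'.modify p 0 (· + 1) else d') d).keys = d.keys := by
  intro ks
  induction ks with
  | nil => intro d _; rfl
  | cons q rest ih =>
    intro d hmem
    simp only [List.foldl_cons]
    have hq : q ∈ d.keys := hmem q (by simp)
    have hcont : d.contains q = true := by
      rw [PySem.Dict.contains_iff_mem_keys]; exact hq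
    have hkeys : (if cond q then d.modify q 0 (· + 1) else d).keys = d.keys := by
      by_cases hc : cond q = true
      · simp [hc, PySem.Dict.keys_modify, PySem.Dict.keys_insert_of_contains d _ hcont]
      · simp [hc]
    rw [ih _ (by intro p hp; rw [hkeys]; exact hmem p (by simp [hp])), hkeys]

-- value at p after the inner loop (over a Nodup key list)
theorem inner_getD (cond : String → Bool) :
    ∀ (ks : List String) (d : PySem.Dict String Int) (p : String), ks.Nodup →
    (ks.foldl (fun d' q => if cond q then d'.modify q 0 (· + 1) else d') d).getD p 0
      = d.getD p 0 + (if p ∈ ks ∧ cond p = true then 1 else 0) := by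
  intro ks
  induction ks with
  | nil => intro d p _; simp
  | cons q rest ih =>
    intro d p hnd
    have hnd' : rest.Nodup := hnd.of_cons
    simp only [List.foldl_cons]
    rw [ih _ p hnd']
    have hstep : (if cond q then d.modify q 0 (· + 1) else d).getD p 0
        = d.getD p 0 + (if p = q ∧ cond p = true then 1 else 0) := by
      by_cases hc : cond q = true
      · rw [if_pos hc, PySem.Dict.getD_modify]
        by_cases hpq : p = q
        · simp [hpq, hc]
        · simp [hpq]
      · have hne : ¬(p = q ∧ cond p = true) := by
          rintro ⟨rfl, hcp⟩; exact hc hcp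
        simp [hc, hne]
    rw [hstep, add_assoc]
    congr 1
    by_cases hc : cond p = true
    · simp only [hc, and_true, List.mem_cons]
      by_cases hpq : p = q
      · subst hpq
        have hnr : p ∉ rest := (List.nodup_cons.mp hnd).1
        simp [hnr]
      · simp [hpq]
    · simp [hc]

-- count table after the sweep over the field keys
theorem sweep_getD :
    ∀ (fields : List (String × Int)) (d : PySem.Dict String Int) (p : String),
    d.keys.Nodup → p ∈ d.keys →
    (fields.foldl (fun d kv =>
        d.keys.foldl (fun d' q =>
          if PySem.Str.startswith kv.1 q then d'.modify q 0 (· + 1) else d') d) d).getD p 0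
      = d.getD p 0 + ((fields.filter (fun kv => PySem.Str.startswith kv.1 p)).length : Int) := by
  intro fields
  induction fields with
  | nil => intro d p _ _; simp
  | cons kv rest ih =>
    intro d p hnd hp
    simp only [List.foldl_cons]
    set d1 := d.keys.foldl (fun d' q =>
      if PySem.Str.startswith kv.1 q then d'.modify q 0 (· + 1) else d') d with hd1
    have hkeys : d1.keys = d.keys := inner_keys _ _ d (fun _ h => h)
    rw [ih d1 p (hkeys ▸ hnd) (hkeys ▸ hp)]
    rw [hd1, inner_getD _ _ d p hnd, List.filter_cons]
    simp only [PySem.Str.startswith_eq]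
    by_cases hc : PySem.Chars.startswith kv.1.toList p.toList = true
    · simp [hc, hp]
      try push_cast
      try ring
    · simp [hc]

theorem counts0_keys_nodup (es : List (String × Int)) :
    (es.foldl (fun d pe => d.insert pe.1 0) (PySem.Dict.empty : PySem.Dict String Int)).keys.Nodup :=
  PySem.Dict.nodup_keys_foldl_insert_key es Prod.fst (fun _ _ => 0)
    (PySem.Dict.empty : PySem.Dict String Int) (by simp)

theorem counts0_mem_keys :
    ∀ (es : List (String × Int)) (d : PySem.Dict String Int) (p : String),
    p ∈ es.map Prod.fst ∨ p ∈ d.keys →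
    p ∈ (es.foldl (fun d pe => d.insert pe.1 0) d).keys := by
  intro es
  induction es with
  | nil => intro d p h; simpa using h.resolve_left (by simp)
  | cons pe rest ih =>
    intro d p h
    simp only [List.foldl_cons]
    apply ih
    rcases h with h | h
    · simp only [List.map_cons, List.mem_cons] at h
      rcases h with h | h
      · right; rw [PySem.Dict.mem_keys_insert]; left; exact h
      · left; exact h
    · right; rw [PySem.Dict.mem_keys_insert]; right; exact h

theorem counts0_getD_zero :
    ∀ (es : List (String × Int)) (d : PySem.Dict String Int) (p : String),
    d.getD p 0 = 0 →
    (es.foldl (fun d pe => d.insert pe.1 0) d).getD p 0 = 0 := by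
  intro es
  induction es with
  | nil => intro d p h; simpa using h
  | cons pe rest ih =>
    intro d p h
    simp only [List.foldl_cons]
    apply ih
    rw [PySem.Dict.getD_insert]
    split <;> simp [h]

-- the generic shape: A's appending fold equals B's filterMap when the counts agree pointwise
theorem foldl_eq_filterMap (f g : String → Int) :
    ∀ (es : List (String × Int)) (acc : List (String × Int × Int)),
    (∀ pe ∈ es, f pe.1 = g pe.1) →
    es.foldl (fun deficits pe =>
        if f pe.1 < pe.2 then deficits ++ [(pe.1, pe.2, f pe.1)] else deficits) acc
      = acc ++ es.filterMap (fun pe =>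
          if g pe.1 < pe.2 then some (pe.1, pe.2, g pe.1) else none) := by
  intro es
  induction es with
  | nil => intro acc _; simp
  | cons pe rest ih =>
    intro acc hagree
    have hpe : f pe.1 = g pe.1 := hagree pe (by simp)
    simp only [List.foldl_cons, List.filterMap_cons]
    rw [ih _ (fun q hq => hagree q (by simp [hq]))]
    rw [hpe]
    split <;> simp

-- ===== VERDICT (by name: the statement is the Claim_ definition above) =====
set_option maxHeartbeats 1000000 in
theorem find_deficit_sections_py_spec : Claim_equal_find_deficit_sections_py := by
  intro fields es _
  have hagree : ∀ pe ∈ es,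
      ((fields.filter (fun kv => PySem.Str.startswith kv.1 pe.1)).length : Int)
        = (fields.foldl (fun d kv =>
              d.keys.foldl (fun d' q =>
                if PySem.Str.startswith kv.1 q then d'.modify q 0 (· + 1) else d') d)
            (es.foldl (fun d pe => d.insert pe.1 0) (PySem.Dict.empty : PySem.Dict String Int))).getD pe.1 0 := by
    intro pe hpe
    have hmem : pe.1 ∈ (es.foldl (fun d pe => d.insert pe.1 0) (PySem.Dict.empty : PySem.Dict String Int)).keys :=
      counts0_mem_keys es _ pe.1 (Or.inl (List.mem_map.mpr ⟨pe, hpe, rfl⟩))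
    rw [sweep_getD fields _ pe.1 (counts0_keys_nodup es) hmem,
        counts0_getD_zero es _ pe.1 (by simp), zero_add]
  unfold Spec_find_deficit_sections_py find_deficit_sections_py find_deficit_sections_py_alt
  dsimp only
  rw [foldl_eq_filterMap
      (fun p => ((fields.filter (fun kv => PySem.Str.startswith kv.1 p)).length : Int))
      (fun p =>
        (fields.foldl (fun d kv =>
            d.keys.foldl (fun d' q =>
              if PySem.Str.startswith kv.1 q then d'.modify q 0 (· + 1) else d') d)
          (es.foldl (fun d pe => d.insert pe.1 0) (PySem.Dict.empty : PySem.Dict String Int))).getD p 0)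
      es [] hagree, List.nil_append]
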